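-- pv_equiv track=rewrite | github.com/DuyTaDinh/Code.ptit.TaDuy | Python/ICPC0114.py | perfect_prime
-- ===== SOURCE A (Python) =====
-- def is_prime(n):
--     if n == 2:
--         return 1
--     if n < 2 or n % 2 == 0:
--         return 0
--     i = 3
--     while i * i <= n:
--         if n % i == 0:
--             return 0
--         i += 2
--     return 1
--
-- def perfect_prime(n):
--     if not is_prime(n):
--         return 0
--     n = str(n)
--     if not is_prime(int(n[::-1])):
--         return 0
--     if not is_prime(sum(map(int, n))):
--         return 0
--     for i in n:
--         if not is_prime(int(i)):
--             return 0
--     return 1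
-- ===== SOURCE B (Python) =====
-- # B: instead of per-number trial division, build one Sieve of Eratosthenes prime
-- # table covering sqrt(max candidate) and decide all three primality questions by
-- # scanning that shared table; digits are vetted by membership in "2357".
-- def perfect_prime(n):
--     if n < 2:
--         return 0
--     s = str(n)
--     if any(c not in "2357" for c in s):
--         return 0
--     r = int(s[::-1])
--     t = sum(map(int, s))
--     m = max(n, max(r, t))
--     lim = 1
--     while (lim + 1) * (lim + 1) <= m:
--         lim += 1
--     sieve = [i >= 2 for i in range(lim + 1)]
--     for p in range(2, lim + 1):
--         if sieve[p]:
--             for q in range(p * p, lim + 1, p):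
--                 sieve[q] = False
--     primes = [p for p in range(lim + 1) if sieve[p]]
--     def prm(x):
--         return x >= 2 and all(x % p != 0 for p in primes if p * p <= x)
--     return 1 if prm(n) and prm(r) and prm(t) else 0
-- ===== Notes on version B (the rewrite author's own statement) =====
-- stated objective: alternative
-- what changed: Instead of running A's trial division separately on n, its reverse, its digit sum and each digit, B vets the digits by membership in "2357", builds one Sieve of Eratosthenes prime table up to sqrt of the largest candidate, and decides the three remaining primality questions by dividing only by the table's primes.
import Mathlib
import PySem

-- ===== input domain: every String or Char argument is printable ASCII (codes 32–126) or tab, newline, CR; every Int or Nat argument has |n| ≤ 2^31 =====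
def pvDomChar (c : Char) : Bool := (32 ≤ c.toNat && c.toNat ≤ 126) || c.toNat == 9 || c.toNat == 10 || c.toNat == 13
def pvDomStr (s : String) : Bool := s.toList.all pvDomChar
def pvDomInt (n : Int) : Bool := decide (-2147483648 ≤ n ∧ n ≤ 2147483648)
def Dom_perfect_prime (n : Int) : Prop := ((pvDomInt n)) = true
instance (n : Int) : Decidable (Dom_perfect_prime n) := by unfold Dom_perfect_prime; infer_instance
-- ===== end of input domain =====

-- B replaces A's four per-number trial divisions by one shared Sieve of Eratosthenes prime
-- table covering sqrt of the largest candidate, deciding each primality question against that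
-- table, and vets the digits by membership in "2357" instead of a per-digit is_prime loop.

-- ===== PORT A =====
-- A's `while i * i <= n: if n % i == 0: return 0; i += 2`
def pyIsPrimeLoop (n i : Int) : Int :=
  if i * i ≤ n then
    if PySem.Int.mod n i = 0 then 0 else pyIsPrimeLoop n (i + 2)
  else 1
termination_by (n + 1 - i).toNat
decreasing_by
  exact (Int.toNat_lt_toNat (Int.sub_pos.mpr (Int.lt_add_one_of_le (le_trans
      (le_trans (Int.le_self_sq i) (le_of_eq (sq i))) (by assumption))))).mpr
    (sub_lt_sub_left (lt_add_of_pos_right i two_pos) (n + 1))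

-- A's helper `is_prime`
def is_prime_port (n : Int) : Int :=
  if n = 2 then 1
  else if n < 2 ∨ PySem.Int.mod n 2 = 0 then 0
  else pyIsPrimeLoop n 3

-- int(c) for a one-character string c (`map(int, n)` / `int(i)` / `int(c)`); the `getD 0`
-- default is unreachable on the digit characters str(n) produces
def pyDigitVal (c : Char) : Int := (PySem.Int.ofChars? [c]).getD 0

-- A's `for i in n: if not is_prime(int(i)): return 0` followed by `return 1`
def pyDigitLoop : List Char → Int
  | [] => 1
  | c :: cs => if is_prime_port (pyDigitVal c) = 0 then 0 else pyDigitLoop cs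

def perfect_prime (n : Int) : Int :=
  if is_prime_port n = 0 then 0
  else
    let s := PySem.Int.toChars n                      -- n = str(n)
    -- int(n[::-1]); the `none` / `getD []` branches are unreachable: here n is a prime ≥ 2,
    -- so s is a nonempty digit string and its reversal parses
    match PySem.Int.ofChars? ((PySem.List.slice? s none none (-1)).getD []) with
    | none => 0
    | some r =>
      if is_prime_port r = 0 then 0
      else if is_prime_port ((s.map pyDigitVal).sum) = 0 then 0
      else pyDigitLoop s

-- ===== PORT B =====
-- B's `lim = 1; while (lim + 1) * (lim + 1) <= m: lim += 1`  (integer sqrt by counting up)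
def sqrtLoopB (m lim : Int) : Int :=
  if (lim + 1) * (lim + 1) ≤ m then sqrtLoopB m (lim + 1) else lim
termination_by (m - lim).toNat
decreasing_by
  exact (Int.toNat_lt_toNat (Int.sub_pos.mpr (lt_of_lt_of_le (lt_add_of_pos_right lim one_pos)
      (le_trans (le_trans (Int.le_self_sq (lim + 1)) (le_of_eq (sq (lim + 1)))) (by assumption))))).mpr
    (sub_lt_sub_left (lt_add_of_pos_right lim one_pos) m)

-- B's `sieve = [i >= 2 for i in range(lim + 1)]`
def sieveInitB (lim : Int) : List Bool :=
  (PySem.List.pyRange 0 (lim + 1) 1).map (fun i => decide (2 ≤ i))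

-- B's inner `for q in range(p * p, lim + 1, p): sieve[q] = False`
-- (the marked indices q are nonnegative, so `q.toNat` is exact for Python's `sieve[q] = False`)
def markRowB (lim p : Int) (sv : List Bool) : List Bool :=
  (PySem.List.pyRange (p * p) (lim + 1) p).foldl (fun s q => s.set q.toNat false) sv

-- body of B's outer sieving loop: `if sieve[p]: <mark multiples>`
-- (`(… ).getD false` is unreachable: p stays inside the list's range)
def sieveStepB (lim : Int) (sv : List Bool) (p : Int) : List Bool :=
  if (PySem.List.pyGet? sv p).getD false = true then markRowB lim p sv else sv

-- B's `for p in range(2, lim + 1): …`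
def sieveB (lim : Int) : List Bool :=
  (PySem.List.pyRange 2 (lim + 1) 1).foldl (sieveStepB lim) (sieveInitB lim)

-- B's `def prm(x): return x >= 2 and all(x % p != 0 for p in primes if p * p <= x)`
def prmB (primes : List Int) (x : Int) : Bool :=
  decide (2 ≤ x) && (primes.filter (fun p => decide (p * p ≤ x))).all
    (fun p => decide (PySem.Int.mod x p ≠ 0))

def perfect_prime_alt (n : Int) : Int :=
  if n < 2 then 0
  else
    let s := PySem.Int.toChars n                      -- s = str(n)
    if s.any (fun c => !(PySem.Chars.isIn [c] "2357".toList)) then 0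
    else
      -- r = int(s[::-1]); the `none` / `getD []` branches are unreachable: s is a nonempty
      -- digit string here, so its reversal parses
      match PySem.Int.ofChars? ((PySem.List.slice? s none none (-1)).getD []) with
      | none => 0
      | some r =>
        let t := (s.map pyDigitVal).sum               -- t = sum(map(int, s))
        let m := max n (max r t)                      -- m = max(n, r, t)
        let lim := sqrtLoopB m 1
        let sv := sieveB lim
        -- primes = [p for p in range(lim + 1) if sieve[p]]
        let primes := (PySem.List.pyRange 0 (lim + 1) 1).filter
          (fun p => (PySem.List.pyGet? sv p).getD false)
        if prmB primes n && prmB primes r && prmB primes t then 1 else 0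

-- ===== PRECONDITION & SPEC =====
def Spec_perfect_prime (n : Int) (out : Int) : Prop := out = perfect_prime_alt n
instance (n : Int) (out : Int) : Decidable (Spec_perfect_prime n out) := by unfold Spec_perfect_prime; infer_instance

-- ===== CLAIM (what is proved, stated in full; the proofs are below) =====
def Claim_equal_perfect_prime : Prop := ∀ (n : Int), Dom_perfect_prime n → Spec_perfect_prime n (perfect_prime n)

-- ===== LEMMAS AND PROOFS =====

-- `x has no divisor d with 2 ≤ d and d*d ≤ x` — the property both sides decide
def NoSmallDiv (x : Int) : Prop := ∀ d : Int, 2 ≤ d → d * d ≤ x → ¬ d ∣ x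

def IsPrimeP (x : Int) : Prop := 2 ≤ x ∧ NoSmallDiv x

lemma pyIsPrimeLoop_zero_or_one (n i : Int) : pyIsPrimeLoop n i = 0 ∨ pyIsPrimeLoop n i = 1 := by
  induction i using pyIsPrimeLoop.induct n with
  | case1 i h hdvd => rw [pyIsPrimeLoop]; simp [h, hdvd]
  | case2 i h hdvd ih => rw [pyIsPrimeLoop]; simpa [h, hdvd] using ih
  | case3 i h => rw [pyIsPrimeLoop]; simp [h]

-- A's trial division over the odd numbers i, i+2, … finds a divisor iff the odd number n has
-- one at all in that range
lemma pyIsPrimeLoop_eq_one_iff (n i : Int) (hn2 : ¬ (2:Int) ∣ n) (hi : 3 ≤ i) (hodd : i % 2 = 1) :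
    pyIsPrimeLoop n i = 1 ↔ ∀ d : Int, i ≤ d → d * d ≤ n → ¬ d ∣ n := by
  induction i using pyIsPrimeLoop.induct n with
  | case1 i h hdvd =>
      rw [pyIsPrimeLoop]
      simp only [h, if_true, hdvd, if_true]
      constructor
      · intro h10; exact absurd h10 (by norm_num)
      · intro hall
        exact absurd ((PySem.Int.mod_eq_zero_iff_dvd n i).mp hdvd)
          (hall i le_rfl h)
  | case2 i h hdvd ih =>
      rw [pyIsPrimeLoop]
      simp only [h, if_true, hdvd, if_false]
      rw [ih (by omega) (by omega)]
      constructor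
      · intro hall d hd hdd hddvd
        rcases lt_or_ge d (i + 2) with hlt | hge
        · have hcase : d = i ∨ d = i + 1 := by omega
          rcases hcase with heq | heq
          · subst heq; exact hdvd ((PySem.Int.mod_eq_zero_iff_dvd _ _).mpr hddvd)
          · -- d = i + 1 is even, n is odd
            subst heq
            exact hn2 (dvd_trans ⟨(i+1)/2, by omega⟩ hddvd)
        · exact hall d hge hdd hddvd
      · intro hall d hd hdd hddvd
        exact hall d (by omega) hdd hddvd
  | case3 i h =>
      rw [pyIsPrimeLoop]
      simp only [h, if_false]
      constructor
      · intro _ d hd hdd hddvd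
        have : i * i ≤ d * d := by nlinarith
        omega
      · intro _; trivial

lemma is_prime_port_eq_one (x : Int) (h : IsPrimeP x) : is_prime_port x = 1 := by
  obtain ⟨h2, hnd⟩ := h
  unfold is_prime_port
  by_cases hx2 : x = 2
  · simp [hx2]
  · have hx3 : 3 ≤ x := by omega
    have hmod : PySem.Int.mod x 2 = x % 2 := PySem.Int.mod_eq_emod_of_pos (by norm_num)
    have hodd : ¬ (2:Int) ∣ x := by
      intro hdvd
      exact hnd 2 (by norm_num) (by omega) hdvd
    have hcond : ¬ (x < 2 ∨ PySem.Int.mod x 2 = 0) := by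
      rw [hmod]
      push Not
      exact ⟨by omega, by omega⟩
    rw [if_neg hx2, if_neg hcond]
    exact (pyIsPrimeLoop_eq_one_iff x 3 hodd le_rfl (by norm_num)).mpr
      (fun d hd hdd => hnd d (by omega) hdd)

lemma is_prime_port_eq_zero (x : Int) (h : ¬ IsPrimeP x) : is_prime_port x = 0 := by
  unfold is_prime_port
  by_cases hx2 : x = 2
  · exfalso
    apply h
    subst hx2
    exact ⟨le_rfl, fun d hd hdd => by nlinarith⟩
  · rw [if_neg hx2]
    by_cases hcond : x < 2 ∨ PySem.Int.mod x 2 = 0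
    · rw [if_pos hcond]
    · rw [if_neg hcond]
      have hmod : PySem.Int.mod x 2 = x % 2 := PySem.Int.mod_eq_emod_of_pos (by norm_num)
      rw [hmod] at hcond
      push Not at hcond
      obtain ⟨hge, hm⟩ := hcond
      have hodd : ¬ (2:Int) ∣ x := by omega
      unfold IsPrimeP NoSmallDiv at h
      push Not at h
      obtain ⟨d, hd2, hdd, hdvd⟩ := h (by omega)
      rcases pyIsPrimeLoop_zero_or_one x 3 with hz | ho
      · exact hz
      · exfalso
        have hd3 : 3 ≤ d := by
          rcases (by omega : d = 2 ∨ 3 ≤ d) with rfl | h3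
          · exact absurd hdvd hodd
          · exact h3
        exact (pyIsPrimeLoop_eq_one_iff x 3 hodd le_rfl (by norm_num)).mp ho d hd3 hdd hdvd

-- every integer ≥ 2 has a prime divisor no larger than itself (via Nat.minFac)
lemma natPrime_isPrimeP (q : Nat) (hq : Nat.Prime q) : IsPrimeP (q : Int) := by
  refine ⟨by exact_mod_cast hq.two_le, fun d hd hdd hdvd => ?_⟩
  have hd0 : 0 ≤ d := by omega
  have hdn : (d.toNat : Int) = d := Int.toNat_of_nonneg hd0
  have hdvdn : d.toNat ∣ q := by
    rw [← Int.natCast_dvd_natCast]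
    rw [hdn]
    exact hdvd
  rcases hq.eq_one_or_self_of_dvd d.toNat hdvdn with h1 | hself
  · omega
  · have : d = (q : Int) := by omega
    subst this
    have h2q : 2 ≤ (q : Int) := by exact_mod_cast hq.two_le
    nlinarith

lemma exists_prime_divisor (d : Int) (hd : 2 ≤ d) :
    ∃ q : Int, IsPrimeP q ∧ q ∣ d ∧ q ≤ d := by
  have hne : d.toNat ≠ 1 := by omega
  have hdn : (d.toNat : Int) = d := Int.toNat_of_nonneg (by omega)
  refine ⟨(d.toNat.minFac : Int), natPrime_isPrimeP _ (Nat.minFac_prime hne), ?_, ?_⟩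
  · rw [← hdn, Int.natCast_dvd_natCast]
    exact Nat.minFac_dvd _
  · have := Nat.minFac_le (n := d.toNat) (by omega)
    omega

-- the sieve's accumulated condition at x (no prime below P squares under x and divides x)
-- decides primality of x, as soon as P exceeds x's small prime divisors
lemma smallCond_iff (x P : Int) (hx : x ≤ P) :
    (2 ≤ x ∧ ∀ p : Int, IsPrimeP p → p < P → ¬(p ∣ x ∧ p * p ≤ x)) ↔ IsPrimeP x := by
  constructor
  · rintro ⟨h2, hall⟩
    refine ⟨h2, fun d hd hdd hdvd => ?_⟩
    obtain ⟨q, hq, hqd, hqle⟩ := exists_prime_divisor d hd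
    have hq2 : 2 ≤ q := hq.1
    have hqq : q * q ≤ x := le_trans (by nlinarith) hdd
    have hqP : q < P := by nlinarith
    exact hall q hq hqP ⟨hqd.trans hdvd, hqq⟩
  · rintro ⟨h2, hnd⟩
    exact ⟨h2, fun p hp _ hpx => hnd p hp.1 hpx.2 hpx.1⟩

-- sqrtLoopB m lim is the integer square root of m (starting from a valid lower bound)
lemma sqrtLoopB_spec (m lim : Int) (h0 : 0 ≤ lim) (h1 : lim * lim ≤ m) :
    lim ≤ sqrtLoopB m lim ∧ (sqrtLoopB m lim) * (sqrtLoopB m lim) ≤ m ∧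
      m < (sqrtLoopB m lim + 1) * (sqrtLoopB m lim + 1) := by
  induction lim using sqrtLoopB.induct m with
  | case1 lim h ih =>
      rw [sqrtLoopB, if_pos h]
      obtain ⟨ha, hb, hc⟩ := ih (by omega) h
      exact ⟨by omega, hb, hc⟩
  | case2 lim h =>
      rw [sqrtLoopB, if_neg h]
      exact ⟨le_rfl, h1, by omega⟩

lemma foldl_set_length (L : List Int) (sv : List Bool) :
    (L.foldl (fun s q => s.set q.toNat false) sv).length = sv.length := by
  induction L generalizing sv with
  | nil => rfl
  | cons q L ih => simp [List.foldl_cons, ih, List.length_set]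

-- marking the (nonnegative) indices of L false, read back at index i
lemma foldl_set_false (L : List Int) (hL : ∀ q ∈ L, 0 ≤ q) (sv : List Bool) (i : Nat) :
    (L.foldl (fun s q => s.set q.toNat false) sv)[i]? =
      if (i : Int) ∈ L then sv[i]?.map (fun _ => false) else sv[i]? := by
  induction L generalizing sv with
  | nil => simp
  | cons q L ih =>
    simp only [List.foldl_cons]
    rw [ih (fun q hq => hL q (List.mem_cons_of_mem _ hq))]
    have hq0 : 0 ≤ q := hL q List.mem_cons_self
    by_cases hqi : q.toNat = i
    · have hqi' : q = (i : Int) := by omega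
      rw [List.getElem?_set]
      cases hsv : sv[i]? with
      | none =>
          have hlen : sv.length ≤ i := List.getElem?_eq_none_iff.mp hsv
          simp [hqi']
          omega
      | some v =>
          obtain ⟨hlt, -⟩ := List.getElem?_eq_some_iff.mp hsv
          simp [hqi']
          omega
    · have hne : (i : Int) ≠ q := by omega
      rw [List.getElem?_set]
      simp [hqi, List.mem_cons, hne]

-- invariant: after the outer sieve loop has processed all p < P, entry i of the sieve says
-- "2 ≤ i and no prime p < P with p² ≤ i divides i"
def SieveGood (lim P : Int) (sv : List Bool) : Prop :=
  sv.length = (lim + 1).toNat ∧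
  ∀ i : Nat, (i : Int) ≤ lim → ∃ b, sv[i]? = some b ∧
    (b = true ↔ (2 ≤ (i : Int) ∧
      ∀ p : Int, IsPrimeP p → p < P → ¬(p ∣ (i : Int) ∧ p * p ≤ (i : Int))))

lemma sieveInitB_good (lim : Int) (h : 0 ≤ lim) : SieveGood lim 2 (sieveInitB lim) := by
  constructor
  · simp [sieveInitB, PySem.List.length_pyRange_one]
  · intro i hi
    refine ⟨decide (2 ≤ (i : Int)), ?_, ?_⟩
    · unfold sieveInitB
      rw [List.getElem?_map, PySem.List.getElem?_pyRange_one]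
      rw [if_pos (by omega)]
      simp
    · simp only [decide_eq_true_eq]
      constructor
      · intro h2
        exact ⟨h2, fun p hp hpP => absurd hp.1 (by omega)⟩
      · exact fun h => h.1

lemma sieveStepB_good (lim P : Int) (sv : List Bool) (hP2 : 2 ≤ P) (hPl : P ≤ lim)
    (hG : SieveGood lim P sv) : SieveGood lim (P + 1) (sieveStepB lim sv P) := by
  obtain ⟨hlen, hent⟩ := hG
  have hPn : ((P.toNat : Int)) = P := Int.toNat_of_nonneg (by omega)
  obtain ⟨bP, hbP, hbPiff⟩ := hent P.toNat (by omega)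
  have hlook : (PySem.List.pyGet? sv P).getD false = bP := by
    rw [← hPn, PySem.List.pyGet?_natCast, hbP]; rfl
  have hbP_iff_prime : bP = true ↔ IsPrimeP P := by
    rw [hbPiff, hPn]
    exact smallCond_iff P P le_rfl
  unfold sieveStepB
  rw [hlook]
  by_cases hb : bP = true
  · -- P is prime: mark its multiples from P*P on
    rw [if_pos hb]
    have hPprime : IsPrimeP P := hbP_iff_prime.mp hb
    have hL0 : ∀ q ∈ PySem.List.pyRange (P * P) (lim + 1) P, 0 ≤ q := by
      intro q hq
      have := (PySem.List.mem_pyRange_iff_of_pos (by omega) q).mp hq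
      nlinarith [this.1]
    constructor
    · unfold markRowB; rw [foldl_set_length]; exact hlen
    · intro i hi
      obtain ⟨b, hb', hbiff⟩ := hent i hi
      unfold markRowB
      rw [foldl_set_false _ hL0 sv i]
      have hmem : (i : Int) ∈ PySem.List.pyRange (P * P) (lim + 1) P ↔
          (P ∣ (i : Int) ∧ P * P ≤ (i : Int)) := by
        rw [PySem.List.mem_pyRange_iff_of_pos (by omega)]
        constructor
        · rintro ⟨h1, _, h3⟩
          exact ⟨by simpa using h3.add (dvd_mul_left P P), h1⟩
        · rintro ⟨h1, h2⟩
          exact ⟨h2, by omega, by simpa using h1.sub (dvd_mul_left P P)⟩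
      by_cases hm : (i : Int) ∈ PySem.List.pyRange (P * P) (lim + 1) P
      · rw [if_pos hm]
        refine ⟨false, by rw [hb']; rfl, ?_⟩
        simp only [Bool.false_eq_true, false_iff]
        rintro ⟨-, hall⟩
        exact hall P hPprime (by omega) (hmem.mp hm)
      · rw [if_neg hm]
        refine ⟨b, hb', ?_⟩
        rw [hbiff]
        constructor
        · rintro ⟨h2, hall⟩
          refine ⟨h2, fun p hp hpP hpx => ?_⟩
          rcases (by omega : p < P ∨ p = P) with h | rfl
          · exact hall p hp h hpx
          · exact hm (hmem.mpr hpx)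
        · rintro ⟨h2, hall⟩
          exact ⟨h2, fun p hp hpP => hall p hp (by omega)⟩
  · -- P is composite: nothing changes, and the p = P case of the new condition is vacuous
    rw [if_neg hb]
    refine ⟨hlen, fun i hi => ?_⟩
    obtain ⟨b, hb', hbiff⟩ := hent i hi
    refine ⟨b, hb', ?_⟩
    rw [hbiff]
    have hnp : ¬ IsPrimeP P := fun h => hb (hbP_iff_prime.mpr h)
    constructor
    · rintro ⟨h2, hall⟩
      refine ⟨h2, fun p hp hpP => ?_⟩
      rcases (by omega : p < P ∨ p = P) with h | rfl
      · exact hall p hp h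
      · exact absurd hp hnp
    · rintro ⟨h2, hall⟩
      exact ⟨h2, fun p hp hpP => hall p hp (by omega)⟩

lemma sieve_fold_good (lim P : Int) (sv : List Bool) (hP : 2 ≤ P) (hG : SieveGood lim P sv) :
    ∃ P', lim + 1 ≤ P' ∧
      SieveGood lim P' ((PySem.List.pyRange P (lim + 1) 1).foldl (sieveStepB lim) sv) := by
  by_cases h : lim + 1 ≤ P
  · rw [PySem.List.pyRange_one_eq_nil h]
    exact ⟨P, h, hG⟩
  · rw [PySem.List.pyRange_one_cons (by omega)]
    simp only [List.foldl_cons]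
    exact sieve_fold_good lim (P + 1) _ (by omega) (sieveStepB_good lim P sv hP (by omega) hG)
termination_by (lim + 1 - P).toNat

lemma sieveB_good (lim : Int) (h : 1 ≤ lim) :
    ∃ P', lim + 1 ≤ P' ∧ SieveGood lim P' (sieveB lim) := by
  unfold sieveB
  exact sieve_fold_good lim 2 _ le_rfl (sieveInitB_good lim (by omega))

-- the filtered list is exactly the primes up to lim
lemma mem_primesB (lim P' : Int) (sv : List Bool) (hP' : lim + 1 ≤ P')
    (hG : SieveGood lim P' sv) (p : Int) :
    (p ∈ (PySem.List.pyRange 0 (lim + 1) 1).filter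
        (fun p => (PySem.List.pyGet? sv p).getD false)) ↔
      (0 ≤ p ∧ p ≤ lim ∧ IsPrimeP p) := by
  obtain ⟨hlen, hent⟩ := hG
  rw [List.mem_filter, PySem.List.mem_pyRange_one]
  constructor
  · rintro ⟨⟨h0, h1⟩, hpred⟩
    have hpn : ((p.toNat : Int)) = p := Int.toNat_of_nonneg h0
    obtain ⟨b, hb, hbiff⟩ := hent p.toNat (by omega)
    rw [← hpn, PySem.List.pyGet?_natCast, hb] at hpred
    have hbt : b = true := hpred
    have := hbiff.mp hbt
    rw [hpn] at this
    exact ⟨h0, by omega, (smallCond_iff p P' (by omega)).mp this⟩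
  · rintro ⟨h0, h1, hp⟩
    refine ⟨⟨h0, by omega⟩, ?_⟩
    have hpn : ((p.toNat : Int)) = p := Int.toNat_of_nonneg h0
    obtain ⟨b, hb, hbiff⟩ := hent p.toNat (by omega)
    rw [← hpn, PySem.List.pyGet?_natCast, hb]
    show b = true
    rw [hbiff, hpn]
    exact (smallCond_iff p P' (by omega)).mpr hp

-- trial division by the table's primes decides primality of every candidate up to m
lemma prmB_correct (primes : List Int) (lim m : Int)
    (hmem : ∀ p, p ∈ primes ↔ (0 ≤ p ∧ p ≤ lim ∧ IsPrimeP p))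
    (hm : m < (lim + 1) * (lim + 1)) (hlim : 0 ≤ lim) (x : Int) (hx : x ≤ m) :
    (prmB primes x = true ↔ IsPrimeP x) := by
  unfold prmB
  rw [Bool.and_eq_true, decide_eq_true_eq, List.all_eq_true]
  constructor
  · rintro ⟨h2, hall⟩
    refine ⟨h2, fun d hd hdd hdvd => ?_⟩
    obtain ⟨q, hq, hqd, hqle⟩ := exists_prime_divisor d hd
    have hq2 : 2 ≤ q := hq.1
    have hqq : q * q ≤ x := le_trans (by nlinarith) hdd
    have hqlim : q ≤ lim := by nlinarith
    have hqmem : q ∈ primes.filter (fun p => decide (p * p ≤ x)) :=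
      List.mem_filter.mpr ⟨(hmem q).mpr ⟨by omega, hqlim, hq⟩, by simpa using hqq⟩
    have := hall q hqmem
    rw [decide_eq_true_eq] at this
    exact this ((PySem.Int.mod_eq_zero_iff_dvd x q).mpr (hqd.trans hdvd))
  · rintro ⟨h2, hnd⟩
    refine ⟨h2, fun p hp => ?_⟩
    obtain ⟨hpmem, hpx⟩ := List.mem_filter.mp hp
    rw [decide_eq_true_eq] at hpx
    have hprime := ((hmem p).mp hpmem).2.2
    rw [decide_eq_true_eq]
    intro hmod
    exact hnd p hprime.1 hpx ((PySem.Int.mod_eq_zero_iff_dvd x p).mp hmod)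

def DigitChars : List Char := ['0','1','2','3','4','5','6','7','8','9']

lemma toDigitsCore_mem_digits (f : Nat) : ∀ (m : Nat) (acc : List Char),
    (∀ c ∈ acc, c ∈ DigitChars) → ∀ c ∈ Nat.toDigitsCore 10 f m acc, c ∈ DigitChars := by
  induction f with
  | zero =>
      intro m acc hacc c hc
      simp only [Nat.toDigitsCore] at hc
      exact hacc c hc
  | succ f ih =>
      intro m acc hacc c hc
      have hd : (m % 10).digitChar ∈ DigitChars := by
        have h10 : m % 10 < 10 := Nat.mod_lt _ (by norm_num)
        set r := m % 10 with hr
        interval_cases r <;> decide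
      simp only [Nat.toDigitsCore] at hc
      by_cases hz : m / 10 = 0
      · rw [if_pos hz] at hc
        rcases List.mem_cons.mp hc with rfl | hmem
        · exact hd
        · exact hacc c hmem
      · rw [if_neg hz] at hc
        exact ih (m / 10) _ (fun d hdm => by
          rcases List.mem_cons.mp hdm with rfl | hmem
          · exact hd
          · exact hacc d hmem) c hc

lemma toChars_mem_digits (n : Int) (hn : 0 ≤ n) :
    ∀ c ∈ PySem.Int.toChars n, c ∈ DigitChars := by
  intro c hc
  unfold PySem.Int.toChars at hc
  rw [if_neg (by omega)] at hc
  unfold Nat.toDigits at hc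
  exact toDigitsCore_mem_digits _ _ _ (by simp) c hc

lemma is_prime_port_three : is_prime_port 3 = 1 := by
  unfold is_prime_port; rw [pyIsPrimeLoop]; decide

lemma is_prime_port_five : is_prime_port 5 = 1 := by
  unfold is_prime_port; rw [pyIsPrimeLoop]; decide

lemma is_prime_port_seven : is_prime_port 7 = 1 := by
  unfold is_prime_port; rw [pyIsPrimeLoop]; decide

lemma is_prime_port_nine : is_prime_port 9 = 0 := by
  unfold is_prime_port; rw [pyIsPrimeLoop]; decide

-- for digit characters, membership in "2357" coincides with primality of the digit value
lemma digit_prime_iff_mem (c : Char) (hc : c ∈ DigitChars) :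
    PySem.Chars.isIn [c] ['2','3','5','7'] = true ↔ is_prime_port (pyDigitVal c) ≠ 0 := by
  fin_cases hc
  · decide
  · decide
  · decide
  · rw [show pyDigitVal '3' = 3 from by decide, is_prime_port_three]; decide
  · decide
  · rw [show pyDigitVal '5' = 5 from by decide, is_prime_port_five]; decide
  · decide
  · rw [show pyDigitVal '7' = 7 from by decide, is_prime_port_seven]; decide
  · decide
  · rw [show pyDigitVal '9' = 9 from by decide, is_prime_port_nine]; decide

lemma pyDigitLoop_eq_one (s : List Char) (h : ∀ c ∈ s, is_prime_port (pyDigitVal c) ≠ 0) :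
    pyDigitLoop s = 1 := by
  induction s with
  | nil => rfl
  | cons c cs ih =>
      have hc := h c (List.mem_cons_self)
      simp [pyDigitLoop, hc, ih (fun d hd => h d (List.mem_cons_of_mem c hd))]

lemma pyDigitLoop_eq_zero (s : List Char) (h : ∃ c ∈ s, is_prime_port (pyDigitVal c) = 0) :
    pyDigitLoop s = 0 := by
  induction s with
  | nil => simp at h
  | cons c cs ih =>
      by_cases hc : is_prime_port (pyDigitVal c) = 0
      · simp [pyDigitLoop, hc]
      · rcases h with ⟨d, hd, hdz⟩
        rcases List.mem_cons.mp hd with rfl | hdcs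
        · exact absurd hdz hc
        · simp [pyDigitLoop, hc, ih ⟨d, hdcs, hdz⟩]

-- ===== VERDICT (by name: the statement is the Claim_ definition above) =====
theorem perfect_prime_spec : Claim_equal_perfect_prime := by
  unfold Claim_equal_perfect_prime Spec_perfect_prime
  intro n _
  by_cases h2 : n < 2
  · have hA : is_prime_port n = 0 := is_prime_port_eq_zero n (fun h => absurd h.1 (by omega))
    simp [perfect_prime, perfect_prime_alt, hA, h2]
  · have hnot2 : ¬ n < 2 := h2
    have hdig : ∀ c ∈ PySem.Int.toChars n, c ∈ DigitChars := toChars_mem_digits n (by omega)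
    have hl : ("2357".toList) = ['2','3','5','7'] := by decide
    by_cases hall : ∀ c ∈ PySem.Int.toChars n, PySem.Chars.isIn [c] ['2','3','5','7'] = true
    · -- every digit of n is one of 2,3,5,7: A's digit loop returns 1, B's `any` test is false
      have hany : (PySem.Int.toChars n).any
          (fun c => !(PySem.Chars.isIn [c] "2357".toList)) = false := by
        rw [List.any_eq_false]
        intro c hc
        rw [hl]
        simp [hall c hc]
      have hloop : pyDigitLoop (PySem.Int.toChars n) = 1 :=
        pyDigitLoop_eq_one _ (fun c hc => (digit_prime_iff_mem c (hdig c hc)).mp (hall c hc))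
      have hB : perfect_prime_alt n =
          (match PySem.Int.ofChars?
              ((PySem.List.slice? (PySem.Int.toChars n) none none (-1)).getD []) with
            | none => 0
            | some r =>
              let t := ((PySem.Int.toChars n).map pyDigitVal).sum
              let m := max n (max r t)
              let lim := sqrtLoopB m 1
              let sv := sieveB lim
              let primes := (PySem.List.pyRange 0 (lim + 1) 1).filter
                (fun p => (PySem.List.pyGet? sv p).getD false)
              if prmB primes n && prmB primes r && prmB primes t then 1 else 0) := by
        simp only [perfect_prime_alt]
        rw [if_neg hnot2, if_neg (by rw [hany]; simp)]
      rw [hB]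
      cases hparse : PySem.Int.ofChars?
          ((PySem.List.slice? (PySem.Int.toChars n) none none (-1)).getD []) with
      | none =>
          by_cases hp : is_prime_port n = 0 <;>
            simp [perfect_prime, hp, hparse]
      | some r =>
          simp only []
          set t := ((PySem.Int.toChars n).map pyDigitVal).sum with ht
          set m := max n (max r t) with hm
          have hm2 : 2 ≤ m := le_trans (by omega) (le_max_left _ _)
          obtain ⟨hla, hlb, hlc⟩ := sqrtLoopB_spec m 1 (by omega) (by omega)
          set lim := sqrtLoopB m 1 with hlim
          obtain ⟨P', hP', hGood⟩ := sieveB_good lim hla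
          set sv := sieveB lim with hsv
          set primes := (PySem.List.pyRange 0 (lim + 1) 1).filter
            (fun p => (PySem.List.pyGet? sv p).getD false) with hprimes
          have hmemP : ∀ p, p ∈ primes ↔ (0 ≤ p ∧ p ≤ lim ∧ IsPrimeP p) :=
            fun p => mem_primesB lim P' sv hP' hGood p
          have hprm : ∀ x : Int, x ≤ m → (prmB primes x = true ↔ IsPrimeP x) :=
            fun x hx => prmB_correct primes lim m hmemP hlc (by omega) x hx
          have agree : ∀ x : Int, x ≤ m → (is_prime_port x = 0 ↔ prmB primes x = false) := by
            intro x hx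
            by_cases hpx : IsPrimeP x
            · simp [is_prime_port_eq_one x hpx, (hprm x hx).mpr hpx]
            · have : prmB primes x ≠ true := fun h => hpx ((hprm x hx).mp h)
              simp [is_prime_port_eq_zero x hpx, Bool.eq_false_iff.mpr this]
          have hxn : n ≤ m := le_max_left _ _
          have hxr : r ≤ m := le_trans (le_max_left _ _) (le_max_right _ _)
          have hxt : t ≤ m := le_trans (le_max_right _ _) (le_max_right _ _)
          by_cases hp : is_prime_port n = 0
          · have hbn : prmB primes n = false := (agree n hxn).mp hp
            simp [perfect_prime, hp, hbn]
          · have hbn : prmB primes n = true := by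
              cases hbn : prmB primes n with
              | false => exact absurd ((agree n hxn).mpr hbn) hp
              | true => rfl
            by_cases hpr : is_prime_port r = 0
            · have hbr : prmB primes r = false := (agree r hxr).mp hpr
              simp [perfect_prime, hp, hparse, hbn, hbr, hpr]
            · have hbr : prmB primes r = true := by
                cases hbr : prmB primes r with
                | false => exact absurd ((agree r hxr).mpr hbr) hpr
                | true => rfl
              by_cases hpt : is_prime_port t = 0
              · have hbt : prmB primes t = false := (agree t hxt).mp hpt
                simp [perfect_prime, hp, hparse, hbn, hbr, hbt, hpr, ← ht, hpt]
              · have hbt : prmB primes t = true := by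
                  cases hbt : prmB primes t with
                  | false => exact absurd ((agree t hxt).mpr hbt) hpt
                  | true => rfl
                simp [perfect_prime, hp, hparse, hbn, hbr, hbt, hpr, ← ht, hpt, hloop]
    · -- some digit of n is not one of 2,3,5,7: both sides return 0
      push Not at hall
      obtain ⟨c, hc, hcf⟩ := hall
      have hcfs : PySem.Chars.isIn [c] "2357".toList = false := by
        rw [hl]
        simpa using hcf
      have hval : is_prime_port (pyDigitVal c) = 0 := by
        by_contra hne
        exact hcf ((digit_prime_iff_mem c (hdig c hc)).mpr hne)
      have hloop0 : pyDigitLoop (PySem.Int.toChars n) = 0 :=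
        pyDigitLoop_eq_zero _ ⟨c, hc, hval⟩
      have hB : perfect_prime_alt n = 0 := by
        simp only [perfect_prime_alt]
        rw [if_neg hnot2, if_pos (List.any_eq_true.mpr ⟨c, hc, by rw [hcfs]; rfl⟩)]
      rw [hB]
      by_cases hp : is_prime_port n = 0
      · simp [perfect_prime, hp]
      · cases hparse : PySem.Int.ofChars?
            ((PySem.List.slice? (PySem.Int.toChars n) none none (-1)).getD []) with
        | none => simp [perfect_prime, hp, hparse]
        | some r =>
            by_cases hpr : is_prime_port r = 0
            · simp [perfect_prime, hp, hparse, hpr]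
            · by_cases hpt : is_prime_port (((PySem.Int.toChars n).map pyDigitVal).sum) = 0
              · simp [perfect_prime, hp, hparse, hpr, hpt]
              · simp [perfect_prime, hp, hparse, hpr, hpt, hloop0]
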